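-- pv_equiv track=rewrite | github.com/wangahrah/diode | src/diode/completion.py | _is_param_override_context
-- ===== SOURCE A (Python) =====
-- def _is_param_override_context(
--     pre_text: str, lines: list[str], current_line: int
-- ) -> bool:
--     """Determine if we're inside a #() parameter override list."""
--     # Scan backward for '#(' pattern
--     combined = pre_text
--     for look_back in range(1, min(21, current_line + 1)):
--         combined = lines[current_line - look_back] + "\n" + combined
--
--     depth = 0
--     for i in range(len(combined) - 1, -1, -1):
--         ch = combined[i]
--         if ch == ")":
--             depth += 1
--         elif ch == "(":
--             if depth > 0:
--                 depth -= 1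
--             else:
--                 # Found unmatched '(' — check if preceded by '#'
--                 if i > 0 and combined[i - 1] == "#":
--                     return True
--                 return False
--         elif ch == ";":
--             return False
--
--     return False
-- ===== SOURCE B (Python) =====
-- def _is_param_override_context(
--     pre_text: str, lines: list[str], current_line: int
-- ) -> bool:
--     """Determine if we're inside a #() parameter override list."""
--     # Forward scan with an explicit stack of open-paren flags: push, for each
--     # '(', whether it is directly preceded by '#' in its own line; pop on ')';
--     # clear on ';'.  The cursor is inside a #() override iff the final stack's
--     # top flag is set.
--     segs = [lines[current_line - k]
--             for k in reversed(range(1, min(21, current_line + 1)))]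
--     segs.append(pre_text)
--     stack = []
--     for seg in segs:
--         for i in range(len(seg)):
--             ch = seg[i]
--             if ch == "(":
--                 stack.append(i > 0 and seg[i - 1] == "#")
--             elif ch == ")":
--                 if stack:
--                     stack.pop()
--             elif ch == ";":
--                 stack.clear()
--     return bool(stack) and stack[-1]
-- ===== Notes on version B (the rewrite author's own statement) =====
-- stated objective: alternative
-- what changed: B replaces A's backward depth-counting scan of a freshly concatenated string by a forward scan over the look-back lines with an explicit stack of booleans: each '(' pushes whether it is directly preceded by '#' in its own line, ')' pops, ';' clears the stack, and the answer is the final stack's top flag; no combined string is ever built and no depth counter or backward traversal is used.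
import Mathlib
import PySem

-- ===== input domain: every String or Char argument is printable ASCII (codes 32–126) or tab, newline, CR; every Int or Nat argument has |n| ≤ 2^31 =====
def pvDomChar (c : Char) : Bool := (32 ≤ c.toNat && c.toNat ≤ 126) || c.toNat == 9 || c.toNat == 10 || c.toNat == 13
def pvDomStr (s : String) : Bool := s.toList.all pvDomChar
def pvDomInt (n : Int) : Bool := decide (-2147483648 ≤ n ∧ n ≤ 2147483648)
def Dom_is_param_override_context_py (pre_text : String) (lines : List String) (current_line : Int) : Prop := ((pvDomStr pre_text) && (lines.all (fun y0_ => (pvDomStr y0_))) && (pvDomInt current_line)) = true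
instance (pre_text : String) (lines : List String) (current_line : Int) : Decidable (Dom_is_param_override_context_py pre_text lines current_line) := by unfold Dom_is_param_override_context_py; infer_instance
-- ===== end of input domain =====

-- B replaces A's backward depth-counting scan of a concatenated string by a FORWARD scan
-- over the segments with an explicit stack of '#'-flags (push on '(', pop on ')', clear on ';',
-- answer = top flag); objective: alternative algorithm, same asymptotic cost, no concatenation.


-- ===== PORT A =====
-- A's backward scan `for i in range(len(combined)-1, -1, -1)`; the first Nat argument is the
-- number of indices still to visit (i+1 visits i, i-1, …, 0).
-- Strings are handled as their character lists throughout (exact on the stated ASCII domain).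
def pvScanA (cs : List Char) : Nat → Int → Bool
  | 0, _ => false
  | (i+1), depth =>
    let ch := cs.getD i ' '
    if ch = ')' then pvScanA cs i (depth + 1)
    else if ch = '(' then
      if depth > 0 then pvScanA cs i (depth - 1)
      else decide (i > 0 ∧ cs.getD (i - 1) ' ' = '#')
    else if ch = ';' then false
    else pvScanA cs i depth

def is_param_override_context_py (pre_text : String) (lines : List String) (current_line : Int) : Bool :=
  -- combined = pre_text; for look_back in range(1, min(21, current_line+1)):
  --   combined = lines[current_line - look_back] + "\n" + combined
  -- (inside Pre_ every index is in range, so the .getD "" default is never used)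
  let combined : List Char :=
    (PySem.List.pyRange 1 (min 21 (current_line + 1)) 1).foldl
      (fun acc look_back =>
        ((PySem.List.pyGet? lines (current_line - look_back)).getD "").toList ++ '\n' :: acc)
      pre_text.toList
  pvScanA combined combined.length 0

-- ===== PORT B =====
-- one forward step of B at index i of segment seg: stack of '#'-flags (head = top)
def pvStep (seg : List Char) (st : List Bool) (i : Nat) : List Bool :=
  let ch := seg.getD i ' '
  if ch = '(' then decide (i > 0 ∧ seg.getD (i - 1) ' ' = '#') :: st
  else if ch = ')' then st.tail          -- `if stack: stack.pop()` (tail [] = [])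
  else if ch = ';' then []               -- `stack.clear()`
  else st

-- B's inner loop `for i in range(len(seg)): …`
def pvFwdSeg (st : List Bool) (seg : List Char) : List Bool :=
  (List.range seg.length).foldl (pvStep seg) st

def is_param_override_context_py_alt (pre_text : String) (lines : List String) (current_line : Int) : Bool :=
  -- segs = [lines[current_line-k] for k in reversed(range(1, min(21, current_line+1)))]; segs.append(pre_text)
  let segs : List (List Char) :=
    ((PySem.List.pyRange 1 (min 21 (current_line + 1)) 1).reverse.map
      (fun k => ((PySem.List.pyGet? lines (current_line - k)).getD "").toList)) ++ [pre_text.toList]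
  let stack := segs.foldl pvFwdSeg []
  -- return bool(stack) and stack[-1]
  stack.headD false

-- ===== PRECONDITION & SPEC =====
-- Pre_ excludes exactly the inputs where Python A raises IndexError on
-- lines[current_line - look_back] (look_back = 1 already out of range); B raises there too.
def Pre_is_param_override_context_py (pre_text : String) (lines : List String) (current_line : Int) : Prop :=
  current_line ≤ 0 ∨ current_line ≤ lines.length
instance (pre_text : String) (lines : List String) (current_line : Int) : Decidable (Pre_is_param_override_context_py pre_text lines current_line) := by unfold Pre_is_param_override_context_py; infer_instance

def pvWitness_is_param_override_context_py : String × List String × Int := ("#(a, ", ["mod m #(q"], 1)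

def Spec_is_param_override_context_py (pre_text : String) (lines : List String) (current_line : Int) (out : Bool) : Prop := out = is_param_override_context_py_alt pre_text lines current_line
instance (pre_text : String) (lines : List String) (current_line : Int) (out : Bool) : Decidable (Spec_is_param_override_context_py pre_text lines current_line out) := by unfold Spec_is_param_override_context_py; infer_instance

-- ===== CLAIM (what is proved, stated in full; the proofs are below) =====
def Claim_equal_is_param_override_context_py : Prop := ∀ (pre_text : String) (lines : List String) (current_line : Int), Dom_is_param_override_context_py pre_text lines current_line → Pre_is_param_override_context_py pre_text lines current_line → Spec_is_param_override_context_py pre_text lines current_line (is_param_override_context_py pre_text lines current_line)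

-- ===== LEMMAS AND PROOFS =====

-- proof-side reference: A's backward scan of ONE segment, returning `inl b` for an early
-- return and `inr d` when the segment is exhausted with leftover depth d
def pvScanSeg (cs : List Char) : Nat → Int → Bool ⊕ Int
  | 0, depth => Sum.inr depth
  | (i+1), depth =>
    let ch := cs.getD i ' '
    if ch = ')' then pvScanSeg cs i (depth + 1)
    else if ch = '(' then
      if depth > 0 then pvScanSeg cs i (depth - 1)
      else Sum.inl (decide (i > 0 ∧ cs.getD (i - 1) ' ' = '#'))
    else if ch = ';' then Sum.inl false
    else pvScanSeg cs i depth

-- A's backward scan over a segment stream (segments listed last-first), depth threaded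
def pvScanSegs : List (List Char) → Int → Bool
  | [], _ => false
  | s :: rest, depth =>
    match pvScanSeg s s.length depth with
    | Sum.inl b => b
    | Sum.inr d => pvScanSegs rest d

theorem pvScanA_eq_seg (cs : List Char) (i : Nat) (d : Int) :
    pvScanA cs i d = (match pvScanSeg cs i d with | Sum.inl b => b | Sum.inr _ => false) := by
  induction i generalizing d with
  | zero => simp [pvScanA, pvScanSeg]
  | succ i ih =>
    simp only [pvScanA, pvScanSeg]
    split_ifs <;> simp [ih]

-- scanning only the first `i ≤ front.length` characters never looks past `front`
theorem pvScanA_prefix (front suffix : List Char) (i : Nat) (d : Int) (hi : i ≤ front.length) :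
    pvScanA (front ++ suffix) i d = pvScanA front i d := by
  induction i generalizing d with
  | zero => rfl
  | succ i ih =>
    have h1 : (front ++ suffix).getD i ' ' = front.getD i ' ' := by
      simp [List.getD, List.getElem?_append_left (by omega : i < front.length)]
    have h2 : (front ++ suffix).getD (i - 1) ' ' = front.getD (i - 1) ' ' := by
      simp [List.getD, List.getElem?_append_left (by omega : i - 1 < front.length)]
    simp only [pvScanA, h1, h2]
    split_ifs <;> simp [ih, Nat.le_of_succ_le hi]

-- splitting A's scan at a '\n' separator: the suffix part is the per-segment scan
theorem pvScanA_split (front rest : List Char) (i : Nat) (d : Int) (hi : i ≤ rest.length) :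
    pvScanA (front ++ '\n' :: rest) (front.length + 1 + i) d =
      (match pvScanSeg rest i d with
       | Sum.inl b => b
       | Sum.inr d' => pvScanA front front.length d') := by
  induction i generalizing d with
  | zero =>
    have h1 : (front ++ '\n' :: rest).getD front.length ' ' = '\n' := by
      simp [List.getD]
    show pvScanA (front ++ '\n' :: rest) (front.length + 1) d = _
    simp only [pvScanA, h1, pvScanSeg]
    norm_num
    exact pvScanA_prefix front ('\n' :: rest) front.length d (Nat.le_refl _)
  | succ i ih =>
    have hidx : front.length + 1 + (i + 1) = (front.length + 1 + i) + 1 := by omega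
    have hsub : front.length + 1 + i - 1 = front.length + i := by omega
    have e1 : (front ++ '\n' :: rest)[front.length + 1 + i]? = rest[i]? := by
      rw [List.getElem?_append_right (by omega)]
      have h : front.length + 1 + i - front.length = i + 1 := by omega
      rw [h]
      simp
    have e2 : (front ++ '\n' :: rest)[front.length + i]? = ('\n' :: rest)[i]? := by
      rw [List.getElem?_append_right (by omega)]
      congr 1
      omega
    rw [hidx]
    simp only [pvScanA, pvScanSeg, List.getD_eq_getElem?_getD, e1, hsub, e2]
    split_ifs with hc1 hc2 hc3
    · exact ih (d + 1) (by omega)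
    · exact ih (d - 1) (by omega)
    · show decide _ = (match (Sum.inl (decide _) : Bool ⊕ Int) with
        | Sum.inl b => b | Sum.inr d' => pvScanA front front.length d')
      by_cases hp : 0 < i
      · obtain ⟨j, rfl⟩ : ∃ j, i = j + 1 := ⟨i - 1, by omega⟩
        simp [show 0 < front.length + 1 + (j + 1) from by omega]
      · have hz : i = 0 := by omega
        subst hz
        simp
    · rfl
    · exact ih d (by omega)

-- the segment list glued with '\n' (last segment deepest), as A builds it
def pvGlue : List (List Char) → List Char
  | [] => []
  | [s] => s
  | s :: t :: r => pvGlue (t :: r) ++ '\n' :: s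

theorem pvScanA_glue (ss : List (List Char)) (d : Int) :
    pvScanA (pvGlue ss) (pvGlue ss).length d = pvScanSegs ss d := by
  induction ss generalizing d with
  | nil => simp [pvGlue, pvScanA, pvScanSegs]
  | cons s rest ih =>
    cases rest with
    | nil =>
      simp only [pvGlue, pvScanSegs]
      rw [pvScanA_eq_seg]
    | cons t r =>
      have hlen : (pvGlue (s :: t :: r)).length = (pvGlue (t :: r)).length + 1 + s.length := by
        simp only [pvGlue, List.length_append, List.length_cons]
        omega
      rw [hlen]
      show pvScanA (pvGlue (t :: r) ++ '\n' :: s) _ d = _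
      rw [pvScanA_split _ _ _ _ (Nat.le_refl _)]
      simp only [pvScanSegs]
      cases pvScanSeg s s.length d with
      | inl b => rfl
      | inr d' => exact ih d'

theorem pvGlue_shift (a b : List Char) (rest : List (List Char)) :
    pvGlue ((a ++ '\n' :: b) :: rest) = pvGlue (b :: a :: rest) := by
  cases rest with
  | nil => simp [pvGlue]
  | cons t r => simp [pvGlue]

theorem pvFold_glue (f : Int → List Char) (ks : List Int) (x : List Char) :
    (ks.foldl (fun acc k => f k ++ '\n' :: acc) x) = pvGlue (x :: ks.map f) := by
  induction ks generalizing x with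
  | nil => simp [pvGlue]
  | cons k ks ih =>
    simp only [List.foldl_cons, List.map_cons]
    rw [ih, pvGlue_shift]

-- the backward per-segment scan never drives the depth negative
theorem pvScanSeg_nonneg (cs : List Char) (i : Nat) (d d' : Int) (hd : 0 ≤ d)
    (h : pvScanSeg cs i d = Sum.inr d') : 0 ≤ d' := by
  induction i generalizing d with
  | zero => simp [pvScanSeg] at h; omega
  | succ i ih =>
    simp only [pvScanSeg] at h
    split_ifs at h with hc1 hc2 hc3
    · exact ih (d + 1) (by omega) h
    · exact ih (d - 1) (by omega) h
    · exact ih d hd h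

-- KEY: the backward scan of the first i characters with leftover-depth continuation into a
-- surrounding stack `st` equals B's forward fold over those i characters, d entries dropped
theorem pvScan_fwd (cs : List Char) (i : Nat) (d : Int) (hd : 0 ≤ d) (st : List Bool) :
    (match pvScanSeg cs i d with
     | Sum.inl b => b
     | Sum.inr d' => ((st.drop d'.toNat).headD false)) =
    ((((List.range i).foldl (pvStep cs) st).drop d.toNat).headD false) := by
  induction i generalizing d st with
  | zero => simp [pvScanSeg]
  | succ i ih =>
    rw [List.range_succ, List.foldl_append]
    simp only [List.foldl_cons, List.foldl_nil]
    by_cases h1 : cs.getD i ' ' = ')'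
    · have h2 : cs.getD i ' ' ≠ '(' := by rw [h1]; decide
      simp only [pvScanSeg, pvStep, List.getD_eq_getElem?_getD] at h1 h2 ⊢
      simp only [h1, Char.reduceEq, ite_true, ite_false]
      rw [ih (d + 1) (by omega) st]
      rw [← List.drop_one, List.drop_drop]
      congr 2
      omega
    · by_cases h2 : cs.getD i ' ' = '('
      · simp only [pvScanSeg, pvStep, List.getD_eq_getElem?_getD] at h1 h2 ⊢
        simp only [h2, Char.reduceEq, ite_true, ite_false]
        by_cases hdpos : d > 0
        · rw [if_pos hdpos, ih (d - 1) (by omega) st]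
          have hnat : d.toNat = (d - 1).toNat + 1 := by omega
          rw [hnat, List.drop_succ_cons]
        · rw [if_neg hdpos]
          have hz : d = 0 := by omega
          subst hz
          simp
      · by_cases h3 : cs.getD i ' ' = ';'
        · simp only [pvScanSeg, pvStep, List.getD_eq_getElem?_getD] at h1 h2 h3 ⊢
          simp [h3]
        · simp only [pvScanSeg, pvStep, List.getD_eq_getElem?_getD] at h1 h2 h3 ⊢
          simp only [h1, h2, h3, ite_false]
          exact ih d hd st

-- A's backward segment-stream scan = B's forward fold over the reversed segment list
theorem pvScanSegs_fwd (ss : List (List Char)) (d : Int) (hd : 0 ≤ d) :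
    pvScanSegs ss d = (((ss.reverse.foldl pvFwdSeg []).drop d.toNat).headD false) := by
  induction ss generalizing d with
  | nil => simp [pvScanSegs]
  | cons s rest ih =>
    simp only [pvScanSegs, List.reverse_cons, List.foldl_append, List.foldl_cons, List.foldl_nil]
    rw [show pvFwdSeg (rest.reverse.foldl pvFwdSeg []) s
          = (List.range s.length).foldl (pvStep s) (rest.reverse.foldl pvFwdSeg []) from rfl]
    rw [← pvScan_fwd s s.length d hd (rest.reverse.foldl pvFwdSeg [])]
    cases hcase : pvScanSeg s s.length d with
    | inl b => rfl
    | inr d' => exact ih d' (pvScanSeg_nonneg s s.length d d' hd hcase)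

-- ===== VERDICT (by name: the statement is the Claim_ definition above) =====
theorem is_param_override_context_py_spec : Claim_equal_is_param_override_context_py := by
  intro pre_text lines current_line _ _
  unfold Spec_is_param_override_context_py
  unfold is_param_override_context_py is_param_override_context_py_alt
  simp only
  rw [pvFold_glue, pvScanA_glue, pvScanSegs_fwd _ 0 le_rfl]
  simp [pvFwdSeg, List.map_reverse]
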